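-- pv_equiv track=rewrite | github.com/dushabella/Introduction_to_Bioinformatics | Rosalind/ex26.py | get_positions_of_new_indels
-- ===== SOURCE A (Python) =====
-- from typing import List, Tuple
--
-- def insert_indel_at_position(s: str, pos: int, indel: str = "-") -> str:
--     """
--     Inserts indel character into string at given position.
--     :param s:
--     :param pos:
--     :param indel:
--     :return:
--     """
--     return s[:pos] + indel + s[pos:]
--
-- def get_positions_of_new_indels(old_seq: str, new_seq: str) -> List[int]:
--     """
--     Compares old sequence with new sequence and finds where indels were added. Returns positions of the new indels.
--     :param old_seq:
--     :param new_seq: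
--     :return: list of integers where each integer denotes indel position in string (the position is "relative", so i-th
--     indel position is given for sequence with added all previous (i-1, i-2, ..., 0) indels).
--     """
--     result = list()
--     old_seq += "x"  # trick to avoid index out of range error
--     for i in range(len(new_seq)):
--         if new_seq[i] != old_seq[i]:
--             old_seq = insert_indel_at_position(old_seq, i)
--             result.append(i)
--     return result
-- ===== SOURCE B (Python) =====
-- def get_positions_of_new_indels(old_seq: str, new_seq: str):
--     # One pass with a pointer into the (never-copied) old sequence:
--     # a mismatch means an indel was inserted there, so the old pointer stays put.
--     padded = old_seq + "x"
--     j = 0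
--     result = []
--     for i, ch in enumerate(new_seq):
--         if ch != padded[j]:
--             result.append(i)
--         else:
--             j += 1
--     return result
-- ===== Notes on version B (the rewrite author's own statement) =====
-- stated objective: alternative
-- what changed: Instead of materialising a new old_seq string with an inserted '-' at every mismatch (string slicing/concatenation per indel), B keeps a single integer pointer into the untouched old sequence that advances only on matches, in one pass; it trades A's per-indel string rebuilding for pointer bookkeeping.
import Mathlib
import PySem

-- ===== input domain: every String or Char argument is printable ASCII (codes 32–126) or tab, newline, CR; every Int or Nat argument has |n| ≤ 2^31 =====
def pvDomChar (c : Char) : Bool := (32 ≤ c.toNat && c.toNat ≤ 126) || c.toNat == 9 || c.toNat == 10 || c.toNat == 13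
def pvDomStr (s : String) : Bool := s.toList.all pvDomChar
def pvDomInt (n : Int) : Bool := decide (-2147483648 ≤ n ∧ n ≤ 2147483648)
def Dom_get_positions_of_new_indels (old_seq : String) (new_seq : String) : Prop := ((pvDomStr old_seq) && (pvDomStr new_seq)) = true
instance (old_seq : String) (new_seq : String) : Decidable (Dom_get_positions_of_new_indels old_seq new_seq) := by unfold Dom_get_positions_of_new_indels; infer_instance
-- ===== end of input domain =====

-- B replaces A's per-mismatch re-building of old_seq (string slice + concat per indel) by a
-- single pass with an integer pointer into the untouched old sequence that advances on matches
-- (objective: alternative).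

-- ===== PORT A =====
-- s[:pos] + "-" + s[pos:]
def pvInsertIndelA (s : List Char) (pos : Int) : List Char :=
  PySem.List.slice s none (some pos) ++ ['-'] ++ PySem.List.slice s (some pos) none

-- for i in range(len(new_seq)): if new_seq[i] != old_seq[i]: old_seq = insert…; result.append(i)
-- (indexing old_seq out of range is where the Python raises IndexError — excluded by Pre_;
-- there the port reads a default character instead)
def pvLoopA (newL : List Char) : List Nat → List Char → List Int → List Int
  | [], _, res => res
  | i :: is, oldL, res =>
    if newL.getD i '?' ≠ oldL.getD i '?' then
      pvLoopA newL is (pvInsertIndelA oldL (i : Int)) (res ++ [(i : Int)])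
    else
      pvLoopA newL is oldL res

def get_positions_of_new_indels (old_seq : String) (new_seq : String) : List Int :=
  pvLoopA new_seq.toList (List.range new_seq.toList.length) (old_seq.toList ++ ['x']) []

-- ===== PORT B =====
-- for i, ch in enumerate(new_seq): mismatch → record i; match → advance pointer j.
-- The pointer j into padded is represented by the remaining suffix 'pad'; padded[j] = pad.headD
-- (Source B's padded[j] raises IndexError exactly when pad is empty — excluded by Pre_).
def pvLoopB : List Char → List Char → Nat → List Int
  | [], _, _ => []
  | c :: cs, pad, i =>
    if c ≠ pad.headD '?' then (i : Int) :: pvLoopB cs pad (i + 1)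
    else pvLoopB cs pad.tail (i + 1)

def get_positions_of_new_indels_alt (old_seq : String) (new_seq : String) : List Int :=
  pvLoopB new_seq.toList (old_seq.toList ++ ['x']) 0

-- ===== PRECONDITION & SPEC =====
-- Pre_ excludes exactly the inputs on which the Python A (and B alike) raises IndexError:
-- those where old_seq+'x' is a subsequence of new_seq minus its last character.
def Pre_get_positions_of_new_indels (old_seq : String) (new_seq : String) : Prop :=
  ¬ List.Sublist (old_seq.toList ++ ['x']) new_seq.toList.dropLast
instance (old_seq : String) (new_seq : String) : Decidable (Pre_get_positions_of_new_indels old_seq new_seq) := by unfold Pre_get_positions_of_new_indels; infer_instance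

def pvWitness_get_positions_of_new_indels : String × String := ("ACGT", "AC-GT")

def Spec_get_positions_of_new_indels (old_seq : String) (new_seq : String) (out : List Int) : Prop := out = get_positions_of_new_indels_alt old_seq new_seq
instance (old_seq : String) (new_seq : String) (out : List Int) : Decidable (Spec_get_positions_of_new_indels old_seq new_seq out) := by unfold Spec_get_positions_of_new_indels; infer_instance

-- ===== CLAIM (what is proved, stated in full; the proofs are below) =====
def Claim_equal_get_positions_of_new_indels : Prop := ∀ (old_seq : String) (new_seq : String), Dom_get_positions_of_new_indels old_seq new_seq → Pre_get_positions_of_new_indels old_seq new_seq → Spec_get_positions_of_new_indels old_seq new_seq (get_positions_of_new_indels old_seq new_seq)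

-- ===== LEMMAS AND PROOFS =====

-- inserting at position i leaves the suffix past i unchanged (also when i ≥ length)
lemma pvInsert_drop (oldL : List Char) (i : Nat) :
    (pvInsertIndelA oldL (i : Int)).drop (i + 1) = oldL.drop i := by
  unfold pvInsertIndelA
  rw [PySem.List.slice_to_natCast, PySem.List.slice_from_natCast]
  rcases (show i ≤ oldL.length ∨ oldL.length < i by omega) with h | h
  · rw [List.drop_append]
    simp [List.length_take, Nat.min_eq_left h]
  · rw [List.take_of_length_le (Nat.le_of_lt h), List.drop_of_length_le (Nat.le_of_lt h)]
    rw [List.drop_append]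
    simp
    omega

-- indexing with a default reads the head of the dropped suffix
lemma pvGetD_drop (l : List Char) (i : Nat) : l.getD i '?' = (l.drop i).headD '?' := by
  simp [List.getD_eq_getElem?_getD]

-- main invariant: past the current index i, A's mutated old string is exactly B's remaining
-- suffix of the untouched padded old string (the ports agree on ALL inputs)
lemma pvLoop_eq : ∀ (cs newL : List Char) (i : Nat) (oldL : List Char) (res : List Int),
    newL.drop i = cs →
    pvLoopA newL (List.range' i cs.length) oldL res = res ++ pvLoopB cs (oldL.drop i) i := by
  intro cs
  induction cs with
  | nil => intro newL i oldL res _; simp [pvLoopA, pvLoopB]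
  | cons c cs ih =>
    intro newL i oldL res hdrop
    have hnew : newL.getD i '?' = c := by
      rw [pvGetD_drop, hdrop]; rfl
    have hold : oldL.getD i '?' = (oldL.drop i).headD '?' := pvGetD_drop oldL i
    have hdrop' : newL.drop (i + 1) = cs := by
      rw [← List.tail_drop, hdrop]; rfl
    show pvLoopA newL (i :: List.range' (i+1) cs.length) oldL res = _
    rw [pvLoopA, hnew, hold]
    by_cases hc : c ≠ (oldL.drop i).headD '?'
    · rw [if_pos hc, ih newL (i+1) (pvInsertIndelA oldL (i:Int)) (res ++ [(i:Int)]) hdrop',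
        pvInsert_drop, pvLoopB, if_pos hc]
      simp
    · rw [if_neg hc, ih newL (i+1) oldL res hdrop', pvLoopB, if_neg hc, List.tail_drop]

-- ===== VERDICT (by name: the statement is the Claim_ definition above) =====
theorem get_positions_of_new_indels_spec : Claim_equal_get_positions_of_new_indels := by
  intro old_seq new_seq _ _
  unfold Spec_get_positions_of_new_indels get_positions_of_new_indels get_positions_of_new_indels_alt
  have h := pvLoop_eq new_seq.toList new_seq.toList 0 (old_seq.toList ++ ['x']) [] rfl
  simpa [List.range_eq_range'] using h
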